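-- pv_equiv track=rewrite | github.com/Justinshakes/PythonPublic | Courses/cs50P/lecture2/problemSet/plates.py | check_numbers_at_end
-- ===== SOURCE A (Python) =====
-- def check_numbers_at_end(s):
--     # Check if numbers appear at the end of the license plate and not in the middle
--     found_number = False
--
--     for i in range(2, len(s)):
--         if s[i].isnumeric() and not found_number and s[i] == '0':
--             return False  # Return False if the first number used is '0'
--         if s[i].isalpha() and found_number:
--             return False  # Return False if a letter appears after a number
--         if s[i].isnumeric() and not found_number:
--             found_number = True  # Set found_number to True when the first number is encountered
--
--     return True
-- ===== SOURCE B (Python) =====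
-- def check_numbers_at_end(s):
--     # Scan the suffix s[2:] right-to-left: track whether a letter has been seen
--     # (i.e. occurs later in the original order) and remember the last digit
--     # encountered, which is the FIRST digit in original order.  A digit met
--     # while a letter was already seen means a letter follows a digit -> False;
--     # otherwise the plate is valid iff the first digit (if any) is not '0'.
--     first_digit = None
--     letter_seen = False
--     for c in reversed(s[2:]):
--         if c.isalpha():
--             letter_seen = True
--         elif c.isnumeric():
--             if letter_seen:
--                 return False
--             first_digit = c
--     return first_digit != '0'
-- ===== Notes on version B (the rewrite author's own statement) =====
-- stated objective: alternative
-- what changed: Replaces A's forward one-pass flag state machine with a right-to-left scan of the suffix that detects a digit occurring before an already-seen letter and captures the first digit as the last digit of the reverse pass, then checks it against the zero character.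
import Mathlib
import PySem

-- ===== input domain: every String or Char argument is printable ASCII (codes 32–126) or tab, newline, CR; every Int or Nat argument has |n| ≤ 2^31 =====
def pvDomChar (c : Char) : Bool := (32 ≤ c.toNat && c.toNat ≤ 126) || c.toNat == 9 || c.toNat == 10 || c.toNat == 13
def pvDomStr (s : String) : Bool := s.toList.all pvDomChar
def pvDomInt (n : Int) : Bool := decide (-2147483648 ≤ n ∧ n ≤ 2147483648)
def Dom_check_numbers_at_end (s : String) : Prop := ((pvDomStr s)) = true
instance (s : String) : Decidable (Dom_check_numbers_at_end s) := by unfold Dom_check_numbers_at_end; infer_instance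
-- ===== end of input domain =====

-- B replaces A's forward flag state machine by a right-to-left scan of s[2:]
-- (digit seen after a letter in the reverse pass => reject; last digit of the
-- reverse pass is the first digit, checked against '0'); objective: alternative.


-- ===== PORT A =====
-- A's loop 'for i in range(2, len(s))' visits s[2], s[3], …: recursion over the
-- chars from index 2 carrying the found_number flag; '.isnumeric()' is ported as
-- PySem.Chars.isdigit, exact on the ASCII domain.
def pvALoop : List Char → Bool → Bool
  | [], _ => true
  | c :: rest, found =>
    if PySem.Chars.isdigit c && !found && (c == '0') then false
    else if PySem.Chars.isalpha c && found then false
    else if PySem.Chars.isdigit c && !found then pvALoop rest true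
    else pvALoop rest found

def check_numbers_at_end (s : String) : Bool :=
  pvALoop (PySem.Chars.slice s.toList (some 2) none) false

-- ===== PORT B =====
-- B's loop body over reversed(s[2:]); the state is (first_digit, letter_seen,
-- returned), where 'returned' models the early 'return False' (once set, the
-- remaining iterations change nothing, exactly as Python stops iterating).
def pvBStep (st : Option Char × Bool × Bool) (c : Char) : Option Char × Bool × Bool :=
  if st.2.2 then st
  else if PySem.Chars.isalpha c then (st.1, true, false)
  else if PySem.Chars.isdigit c then
    (if st.2.1 then (st.1, st.2.1, true) else (some c, st.2.1, false))
  else st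

def check_numbers_at_end_alt (s : String) : Bool :=
  let st := ((PySem.Chars.slice s.toList (some 2) none).reverse).foldl pvBStep (none, false, false)
  if st.2.2 then false else !(st.1 == some '0')

-- ===== PRECONDITION & SPEC =====
def Spec_check_numbers_at_end (s : String) (out : Bool) : Prop := out = check_numbers_at_end_alt s
instance (s : String) (out : Bool) : Decidable (Spec_check_numbers_at_end s out) := by unfold Spec_check_numbers_at_end; infer_instance

-- ===== CLAIM (what is proved, stated in full; the proofs are below) =====
def Claim_equal_check_numbers_at_end : Prop := ∀ (s : String), Dom_check_numbers_at_end s → Spec_check_numbers_at_end s (check_numbers_at_end s)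

-- ===== LEMMAS AND PROOFS =====
-- B's state after processing (in reverse) the whole suffix l, as a foldr over l.
def pvState (l : List Char) : Option Char × Bool × Bool :=
  l.foldr (fun c st => pvBStep st c) (none, false, false)

def pvFinal (st : Option Char × Bool × Bool) : Bool :=
  if st.2.2 then false else !(st.1 == some '0')

theorem pvState_cons (c : Char) (l : List Char) :
    pvState (c :: l) = pvBStep (pvState l) c := rfl

-- An ASCII digit is not a letter.
theorem pv_digit_not_alpha (c : Char) (h : PySem.Chars.isdigit c = true) :
    PySem.Chars.isalpha c = false := by
  simp only [PySem.Chars.isdigit, Bool.and_eq_true, decide_eq_true_eq] at h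
  have hA : ¬ ('A' ≤ c) := fun hc => (by decide : ¬ ('A' : Char) ≤ '9') (le_trans hc h.2)
  have ha : ¬ ('a' ≤ c) := fun hc => (by decide : ¬ ('a' : Char) ≤ '9') (le_trans hc h.2)
  simp [PySem.Chars.isalpha, PySem.Chars.isupper, PySem.Chars.islower, hA, ha]

-- letter_seen equals 'some char of l is a letter', and the flag is set whenever
-- the loop has returned early.
theorem pvState_ls (l : List Char) :
    (pvState l).2.1 = l.any PySem.Chars.isalpha ∧
      ((pvState l).2.2 = true → (pvState l).2.1 = true) := by
  induction l with
  | nil => simp [pvState]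
  | cons c rest ih =>
    rw [pvState_cons]
    rcases ih with ⟨h1, h2⟩
    simp only [pvBStep, List.any_cons]
    by_cases hd : (pvState rest).2.2 = true
    · have hr : rest.any PySem.Chars.isalpha = true := h1 ▸ h2 hd
      simp [hd, h2 hd, hr]
    · by_cases ha : PySem.Chars.isalpha c = true
      · simp [hd, ha]
      · by_cases hg : PySem.Chars.isdigit c = true
        · by_cases hl : (pvState rest).2.1 = true <;> simp [hd, ha, hg, hl, ← h1]
        · simp [hd, ha, hg, h1]

-- After the first digit, A's loop just rejects letters.
theorem pvALoop_true (l : List Char) : pvALoop l true = !(l.any PySem.Chars.isalpha) := by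
  induction l with
  | nil => simp [pvALoop]
  | cons c rest ih =>
    simp only [pvALoop, List.any_cons]
    by_cases h : PySem.Chars.isalpha c = true <;> simp [h, ih]

theorem pvALoop_eq_final (l : List Char) : pvALoop l false = pvFinal (pvState l) := by
  induction l with
  | nil => simp [pvALoop, pvState, pvFinal]
  | cons c rest ih =>
    rw [pvState_cons]
    rcases pvState_ls rest with ⟨hls, hdl⟩
    by_cases hg : PySem.Chars.isdigit c = true
    · have ha := pv_digit_not_alpha c hg
      by_cases h0 : (c == '0') = true
      · -- first digit is '0' in A; B records it (or had already returned)
        have hc : c = '0' := by simpa using h0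
        subst hc
        by_cases hd : (pvState rest).2.2 = true <;>
          by_cases hl : (pvState rest).2.1 = true <;>
            simp [pvALoop, pvBStep, pvFinal, hd, hl,
              (by decide : PySem.Chars.isdigit '0' = true),
              (by decide : PySem.Chars.isalpha '0' = false)]
      · -- a nonzero first digit: A rejects iff a letter follows; B rejects iff
        -- letter_seen (or had returned, in which case a letter exists)
        by_cases hd : (pvState rest).2.2 = true
        · simp [pvALoop, pvBStep, pvFinal, pvALoop_true, hg, ha, h0, hd, hls ▸ hdl hd]
        · by_cases hl : (pvState rest).2.1 = true <;>
            simp [pvALoop, pvBStep, pvFinal, pvALoop_true, hg, ha, h0, hd, hl, ← hls]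
    · by_cases ha : PySem.Chars.isalpha c = true
      · -- a letter before any digit in A: skipped; B sets letter_seen
        have e1 : pvALoop (c :: rest) false = pvALoop rest false := by
          simp [pvALoop, hg, ha]
        rw [e1, ih]
        by_cases hd : (pvState rest).2.2 = true <;> simp [pvBStep, pvFinal, ha, hd]
      · -- neither letter nor digit: both loops skip the character
        have e1 : pvALoop (c :: rest) false = pvALoop rest false := by
          simp [pvALoop, hg, ha]
        rw [e1, ih]
        by_cases hd : (pvState rest).2.2 = true <;> simp [pvBStep, pvFinal, hg, ha, hd]

-- ===== VERDICT (by name: the statement is the Claim_ definition above) =====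
theorem check_numbers_at_end_spec : Claim_equal_check_numbers_at_end := by
  intro s _
  unfold Spec_check_numbers_at_end check_numbers_at_end check_numbers_at_end_alt
  rw [List.foldl_reverse]
  exact pvALoop_eq_final _
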